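-- pv_equiv track=rewrite | github.com/almide/almide-lander | generators/generate_napi.py | extract_runtime_lines
-- ===== SOURCE A (Python) =====
-- STRIP_LINE_PREFIXES = [
--     "#![allow",
--     "use std::collections",
--     "fn main(",
-- ]
--
-- def should_strip_line(line):
--     return any(line.startswith(p) for p in STRIP_LINE_PREFIXES)
--
-- def extract_runtime_lines(rust_source):
--     """Extract the runtime/support portion of mathlib.rs (everything before the
--     first struct/enum definition), stripping preamble lines we don't want."""
--     lines = rust_source.split("\n")
--     result = []
--     for line in lines:
--         if should_strip_line(line):
--             continue
--         # Stop when we hit the first Almide type definition.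
--         # These are the #[derive(...)] lines that precede struct/enum.
--         if line.startswith("#[derive(") and ("PartialEq" in line or "PartialOrd" in line):
--             break
--         result.append(line)
--     # Trim trailing blank lines
--     while result and result[-1].strip() == "":
--         result.pop()
--     return result
-- ===== SOURCE B (Python) =====
-- STRIP_LINE_PREFIXES = [
--     "#![allow",
--     "use std::collections",
--     "fn main(",
-- ]
--
-- def extract_runtime_lines(rust_source):
--     lines = rust_source.split("\n")
--     # pass 1: find the cutoff = index of the first type-definition derive line
--     cutoff = next(
--         (i for i, line in enumerate(lines)
--          if line.startswith("#[derive(")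
--          and ("PartialEq" in line or "PartialOrd" in line)),
--         len(lines),
--     )
--     # pass 2: keep everything before the cutoff that is not a stripped preamble line
--     kept = [line for line in lines[:cutoff]
--             if not any(line.startswith(p) for p in STRIP_LINE_PREFIXES)]
--     # pass 3: cut after the last non-blank line
--     last = 0
--     for i, line in enumerate(kept):
--         if line.strip() != "":
--             last = i + 1
--     return kept[:last]
-- ===== Notes on version B (the rewrite author's own statement) =====
-- stated objective: alternative
-- what changed: A's single interleaved loop (continue/break) followed by a pop-while is replaced by three separate passes: find the cutoff index of the first derive line with enumerate/next, filter the pre-cutoff slice with a comprehension, then cut after the last non-blank line found by a forward scan.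
import Mathlib
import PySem

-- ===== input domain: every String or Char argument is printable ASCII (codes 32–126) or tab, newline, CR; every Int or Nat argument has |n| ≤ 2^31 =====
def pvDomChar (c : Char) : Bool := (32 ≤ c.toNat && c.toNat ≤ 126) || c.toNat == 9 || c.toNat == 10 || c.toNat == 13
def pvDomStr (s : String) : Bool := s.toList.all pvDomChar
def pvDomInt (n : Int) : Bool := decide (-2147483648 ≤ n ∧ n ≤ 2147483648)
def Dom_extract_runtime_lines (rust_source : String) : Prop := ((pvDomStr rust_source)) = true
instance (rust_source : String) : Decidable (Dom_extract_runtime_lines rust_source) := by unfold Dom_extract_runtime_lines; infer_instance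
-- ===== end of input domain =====

-- B separates the work into three passes (find the cutoff index, filter, trim trailing blanks)
-- instead of A's single interleaved break/continue loop plus a pop-while; same values, similar cost.


-- ===== PORT A =====
def STRIP_LINE_PREFIXES : List String := ["#![allow", "use std::collections", "fn main("]

def should_strip_line (line : String) : Bool :=
  STRIP_LINE_PREFIXES.any (fun p => PySem.Str.startswith line p)

-- the derive-line test of A's break condition
def pvDeriveA (line : String) : Bool :=
  PySem.Str.startswith line "#[derive(" &&
    (PySem.Str.isIn "PartialEq" line || PySem.Str.isIn "PartialOrd" line)

-- A's for-loop with continue/break, as structural recursion on the lines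
def pvLoopA : List String → List String
  | [] => []
  | line :: rest =>
    if should_strip_line line then pvLoopA rest
    else if pvDeriveA line then []
    else line :: pvLoopA rest

-- A's `while result and result[-1].strip() == "": result.pop()`
def pvTrimA : List String → List String
  | [] => []
  | line :: rest =>
    match pvTrimA rest with
    | [] => if PySem.Str.strip line == "" then [] else [line]
    | r => line :: r

def extract_runtime_lines (rust_source : String) : List String :=
  pvTrimA (pvLoopA ((PySem.Str.split? rust_source "\n").getD []))

-- ===== PORT B =====
-- B's derive-line test (the cutoff condition)
def pvDeriveB (line : String) : Bool :=
  PySem.Str.startswith line "#[derive(" &&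
    (PySem.Str.isIn "PartialEq" line || PySem.Str.isIn "PartialOrd" line)

-- B's `any(line.startswith(p) for p in STRIP_LINE_PREFIXES)`
def pvStripB (line : String) : Bool :=
  (["#![allow", "use std::collections", "fn main("] : List String).any
    (fun p => PySem.Str.startswith line p)

-- pass 1: next((i for i, line in enumerate(lines) if …), len(lines))
def pvCutoffB (lines : List String) : Int :=
  (((PySem.List.enumerate lines 0).find? (fun p => pvDeriveB p.2)).map (·.1)).getD
    (lines.length : Int)

-- pass 2: [line for line in lines[:cutoff] if not any(…)]
def pvKeptB (lines : List String) : List String :=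
  (PySem.List.slice lines none (some (pvCutoffB lines))).filter (fun line => !pvStripB line)

-- pass 3: for i, line in enumerate(kept): if line.strip() != "": last = i + 1
def pvLastB (kept : List String) : Int :=
  (PySem.List.enumerate kept 0).foldl
    (fun acc p => if !(PySem.Str.strip p.2 == "") then p.1 + 1 else acc) 0

-- return kept[:last]
def pvTailB (kept : List String) : List String :=
  PySem.List.slice kept none (some (pvLastB kept))

def extract_runtime_lines_alt (rust_source : String) : List String :=
  pvTailB (pvKeptB ((PySem.Str.split? rust_source "\n").getD []))

-- ===== PRECONDITION & SPEC =====
def Spec_extract_runtime_lines (rust_source : String) (out : List String) : Prop := out = extract_runtime_lines_alt rust_source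
instance (rust_source : String) (out : List String) : Decidable (Spec_extract_runtime_lines rust_source out) := by unfold Spec_extract_runtime_lines; infer_instance

-- ===== CLAIM (what is proved, stated in full; the proofs are below) =====
def Claim_equal_extract_runtime_lines : Prop := ∀ (rust_source : String), Dom_extract_runtime_lines rust_source → Spec_extract_runtime_lines rust_source (extract_runtime_lines rust_source)

-- ===== LEMMAS AND PROOFS =====

-- the two ports' predicates coincide definitionally
lemma pvDeriveAB : pvDeriveA = pvDeriveB := rfl
lemma pvStripAB : pvStripB = should_strip_line := rfl

-- a derive line never starts with a strip prefix (they differ within the first two chars)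
lemma derive_not_strip (l : String) (h : pvDeriveA l = true) : should_strip_line l = false := by
  have hpre : ("#[derive(".toList) <+: l.toList := by
    simp only [pvDeriveA, Bool.and_eq_true] at h
    exact (PySem.Chars.startswith_iff _ _).mp (by simpa using h.1)
  have hlen : 9 ≤ l.toList.length := by
    have h9 : ("#[derive(".toList).length = 9 := by decide
    have := hpre.length_le
    omega
  have e0 : l.toList[0]'(by omega) = '#' := by
    have h' := hpre.getElem (i := 0) (by decide); exact h'.symm.trans (by decide)
  have e1 : l.toList[1]'(by omega) = '[' := by
    have h' := hpre.getElem (i := 1) (by decide); exact h'.symm.trans (by decide)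
  rw [Bool.eq_false_iff]
  intro hs
  simp only [should_strip_line, STRIP_LINE_PREFIXES, List.any_cons, List.any_nil,
    Bool.or_eq_true, PySem.Str.startswith_eq, Bool.or_false] at hs
  rcases hs with hs | hs | hs
  · have hp := (PySem.Chars.startswith_iff _ _).mp hs
    exact absurd ((hp.getElem (i := 1) (by decide)).trans e1) (by decide)
  · have hp := (PySem.Chars.startswith_iff _ _).mp hs
    exact absurd ((hp.getElem (i := 0) (by decide)).trans e0) (by decide)
  · have hp := (PySem.Chars.startswith_iff _ _).mp hs
    exact absurd ((hp.getElem (i := 0) (by decide)).trans e0) (by decide)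

-- A's break/continue loop = filter of the takeWhile-prefix before the first derive line
lemma loopA_eq (ls : List String) :
    pvLoopA ls = (ls.takeWhile (fun l => !pvDeriveA l)).filter (fun l => !should_strip_line l) := by
  induction ls with
  | nil => rfl
  | cons l rest ih =>
    by_cases hs : should_strip_line l = true
    · have hd : pvDeriveA l = false := by
        cases h' : pvDeriveA l
        · rfl
        · exact absurd (derive_not_strip l h') (by simp [hs])
      simp [pvLoopA, hs, hd, ih]
    · by_cases hd : pvDeriveA l = true
      · simp [pvLoopA, hs, hd]
      · simp only [Bool.not_eq_true] at hs hd
        simp [pvLoopA, hs, hd, ih]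

-- B's enumerate/next cutoff search computes findIdx (with default = length)
lemma cutoff_eq (ls : List String) : ∀ (s : Int),
    (((PySem.List.enumerate ls s).find? (fun p => pvDeriveB p.2)).map (·.1)).getD
      (s + (ls.length : Int)) = s + ((ls.findIdx pvDeriveB : Nat) : Int) := by
  induction ls with
  | nil => intro s; simp [PySem.List.enumerate, List.findIdx]
  | cons l rest ih =>
    intro s
    rw [PySem.List.enumerate_cons, List.find?_cons]
    by_cases hd : pvDeriveB l = true
    · simp [hd, List.findIdx_cons]
    · simp only [Bool.not_eq_true] at hd
      have hdef : s + ((l :: rest).length : Int) = (s + 1) + (rest.length : Int) := by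
        simp; ring
      rw [hd, hdef]
      rw [ih (s + 1)]
      simp [List.findIdx_cons, hd]
      ring

-- take-to-findIdx is takeWhile of the negated predicate
lemma take_findIdx (p : String → Bool) (ls : List String) :
    ls.take (ls.findIdx p) = ls.takeWhile (fun l => !p l) := by
  induction ls with
  | nil => rfl
  | cons l rest ih =>
    by_cases h : p l = true
    · simp [List.findIdx_cons, h]
    · simp only [Bool.not_eq_true] at h
      simp [List.findIdx_cons, h, ih]

-- 1-based index of the last non-blank line (0 if none)
def pvLastAux : List String → Nat
  | [] => 0
  | l :: rest =>
    let k := pvLastAux rest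
    if k = 0 then (if PySem.Str.strip l == "" then 0 else 1) else k + 1

-- A's pop-while trim keeps exactly the first pvLastAux lines
lemma trimA_eq (r : List String) : pvTrimA r = r.take (pvLastAux r) := by
  induction r with
  | nil => rfl
  | cons l rest ih =>
    by_cases hk : pvLastAux rest = 0
    · have hnil : pvTrimA rest = [] := by rw [ih, hk]; rfl
      by_cases hb : (PySem.Str.strip l == "") = true
      · simp [pvTrimA, hnil, hb, pvLastAux, hk]
      · simp [pvTrimA, hnil, hb, pvLastAux, hk]
    · rw [pvTrimA, ih,
        show pvLastAux (l :: rest) = pvLastAux rest + 1 from by simp [pvLastAux, hk],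
        List.take_succ_cons]
      cases hr : List.take (pvLastAux rest) rest with
      | nil =>
        exfalso
        rcases List.take_eq_nil_iff.mp hr with h | h
        · exact hk h
        · rw [h] at hk; exact hk rfl
      | cons x xs => rfl

-- B's forward fold over enumerate computes the same 1-based last index
lemma foldl_last (r : List String) : ∀ (s a : Int),
    (PySem.List.enumerate r s).foldl
      (fun acc p => if !(PySem.Str.strip p.2 == "") then p.1 + 1 else acc) a
    = if pvLastAux r = 0 then a else s + ((pvLastAux r : Nat) : Int) := by
  induction r with
  | nil => intro s a; simp [PySem.List.enumerate, pvLastAux]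
  | cons l rest ih =>
    intro s a
    rw [PySem.List.enumerate_cons, List.foldl_cons, ih (s + 1)]
    by_cases hk : pvLastAux rest = 0
    · by_cases hb : (PySem.Str.strip l == "") = true
      · simp [hk, hb, pvLastAux]
      · simp [hk, hb, pvLastAux]
    · rw [show pvLastAux (l :: rest) = pvLastAux rest + 1 from by simp [pvLastAux, hk]]
      rw [if_neg hk, if_neg (by omega)]
      push_cast
      ring

-- ===== VERDICT (by name: the statement is the Claim_ definition above) =====
theorem extract_runtime_lines_spec : Claim_equal_extract_runtime_lines := by
  intro rs _
  unfold Spec_extract_runtime_lines extract_runtime_lines extract_runtime_lines_alt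
  set lines := (PySem.Str.split? rs "\n").getD [] with hlines
  -- identify B's kept list with A's loop output
  have hkept : pvKeptB lines = pvLoopA lines := by
    unfold pvKeptB pvCutoffB
    have hcut := cutoff_eq lines 0
    rw [zero_add, zero_add] at hcut
    rw [hcut, PySem.List.slice_to_natCast, take_findIdx, ← pvDeriveAB, pvStripAB, ← loopA_eq]
  rw [hkept]
  -- identify B's trim with A's trim
  unfold pvTailB pvLastB
  have hlast := foldl_last (pvLoopA lines) 0 0
  rw [hlast, trimA_eq]
  by_cases hk : pvLastAux (pvLoopA lines) = 0
  · rw [if_pos hk, hk]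
    rw [show (0 : Int) = ((0 : Nat) : Int) from rfl, PySem.List.slice_to_natCast]
  · rw [if_neg hk, zero_add, PySem.List.slice_to_natCast]
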